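-- pv_equiv track=rewrite | github.com/Chen-Yihua/anchor-automata-explainer | datasets/og_loader.py | check
-- ===== SOURCE A (Python) =====
-- from typing import List, Tuple
--
-- def check(seq: List[str]) -> bool:
--     if len(seq) < 2 or len(seq) % 2 != 0:
--         return False
--
--     patterns = [('a', 'b'), ('b', 'c'), ('c', 'a')]
--     for p in patterns:
--         ok = True
--         for i in range(0, len(seq), 2):
--             if tuple(seq[i:i+2]) != p:
--                 ok = False
--                 break
--         if ok:
--             return True
--     return False
-- ===== SOURCE B (Python) =====
-- def check(seq):
--     if len(seq) < 2 or len(seq) % 2 != 0: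
--         return False
--     evens = seq[0::2]
--     odds = seq[1::2]
--     return (all(x == evens[0] for x in evens)
--             and all(x == odds[0] for x in odds)
--             and (evens[0], odds[0]) in (('a', 'b'), ('b', 'c'), ('c', 'a')))
-- ===== Notes on version B (the rewrite author's own statement) =====
-- stated objective: simpler
-- what changed: Replaced the pattern-by-pattern loop with a stride-2 inner scan by a parity split: take the even- and odd-position subsequences, check each is constant, and test the (first-even, first-odd) pair for membership in the three patterns.
import Mathlib
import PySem

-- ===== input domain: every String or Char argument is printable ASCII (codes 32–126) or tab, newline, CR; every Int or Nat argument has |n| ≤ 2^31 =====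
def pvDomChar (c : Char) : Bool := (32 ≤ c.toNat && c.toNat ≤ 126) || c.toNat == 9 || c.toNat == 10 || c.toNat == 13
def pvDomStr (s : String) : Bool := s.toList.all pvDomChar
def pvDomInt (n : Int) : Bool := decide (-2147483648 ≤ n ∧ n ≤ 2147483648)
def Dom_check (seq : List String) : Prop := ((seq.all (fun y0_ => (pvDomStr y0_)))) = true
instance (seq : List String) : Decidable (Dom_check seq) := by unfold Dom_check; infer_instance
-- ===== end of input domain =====

-- B changes the decomposition: instead of A's loop over the three patterns with a stride-2
-- inner scan, B splits the sequence by parity, checks both halves constant, and does one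
-- membership test on the leading pair (objective: simpler; same return value).

-- ===== PORT A =====
-- inner loop 'for i in range(0, len(seq), 2): if tuple(seq[i:i+2]) != p: ok = False; break'
-- as structural recursion on the index i (the break is the early 'false' return)
def pvInnerA (seq : List String) (p : String × String) (i : Nat) : Bool :=
  if i < seq.length then
    if PySem.List.slice seq (some (i : Int)) (some ((i : Int) + 2)) = [p.1, p.2] then
      pvInnerA seq p (i + 2)
    else false
  else true
termination_by seq.length - i

def check (seq : List String) : Bool :=
  if seq.length < 2 || seq.length % 2 != 0 then false
  else
    -- 'for p in patterns: … if ok: return True' / 'return False' = any over the pattern list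
    [("a", "b"), ("b", "c"), ("c", "a")].any (fun p => pvInnerA seq p 0)

-- ===== PORT B =====
-- seq[0::2] / seq[1::2]: hand-ported step-2 slice from the start (exact for start 0 and
-- step 2 on any list; seq[1::2] is the step-2 slice of the tail)
def pvEveryOther (l : List String) : List String :=
  match l with
  | [] => []
  | [x] => [x]
  | x :: _ :: t => x :: pvEveryOther t

def check_alt (seq : List String) : Bool :=
  if seq.length < 2 || seq.length % 2 != 0 then false
  else
    let evens := pvEveryOther seq
    let odds := pvEveryOther seq.tail
    match evens, odds with
    | e0 :: _, o0 :: _ =>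
        evens.all (· == e0) && odds.all (· == o0) &&
        [("a", "b"), ("b", "c"), ("c", "a")].contains (e0, o0)
    | _, _ => false

-- ===== PRECONDITION & SPEC =====
def Spec_check (seq : List String) (out : Bool) : Prop := out = check_alt seq
instance (seq : List String) (out : Bool) : Decidable (Spec_check seq out) := by unfold Spec_check; infer_instance

-- ===== CLAIM (what is proved, stated in full; the proofs are below) =====
def Claim_equal_check : Prop := ∀ (seq : List String), Dom_check seq → Spec_check seq (check seq)

-- ===== LEMMAS AND PROOFS =====

-- unfolding B's parity split one element at a time
lemma pvEveryOther_cons (x : String) (l : List String) :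
    pvEveryOther (x :: l) = x :: pvEveryOther l.tail := by
  cases l <;> rfl

-- dropping the first two elements shifts A's slice window down by two
lemma pvSlice_shift (t : List String) (a b : String) (i : Nat) :
    PySem.List.slice (a :: b :: t) (some ((i + 2 : Nat) : Int)) (some (((i + 2 : Nat) : Int) + 2)) =
    PySem.List.slice t (some (i : Int)) (some ((i : Int) + 2)) := by
  have e1 := PySem.List.slice_natCast_add (xs := a :: b :: t) (j := i + 2) (n := 2)
  have e2 := PySem.List.slice_natCast_add (xs := t) (j := i) (n := 2)
  simp only [Nat.cast_ofNat] at e1 e2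
  rw [e1, e2]
  rfl

-- shifting the scan index by 2 is scanning the tail-after-two
lemma pvInnerA_shift (t : List String) (a b : String) (p : String × String) :
    ∀ (k i : Nat), t.length ≤ i + k →
      pvInnerA (a :: b :: t) p (i + 2) = pvInnerA t p i := by
  intro k
  induction k with
  | zero =>
    intro i hk
    conv_lhs => rw [pvInnerA]
    conv_rhs => rw [pvInnerA]
    have h : ¬ i < t.length := by omega
    have h2 : ¬ i + 2 < (a :: b :: t).length := by simp; omega
    rw [if_neg h2, if_neg h]
  | succ m ih =>
    intro i hk
    conv_lhs => rw [pvInnerA]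
    conv_rhs => rw [pvInnerA]
    by_cases h : i < t.length
    · have h2 : i + 2 < (a :: b :: t).length := by simp; omega
      rw [if_pos h2, if_pos h, pvSlice_shift t a b i]
      by_cases hc : PySem.List.slice t (some (i : Int)) (some ((i : Int) + 2)) = [p.1, p.2]
      · rw [if_pos hc, if_pos hc]
        exact ih (i + 2) (by omega)
      · rw [if_neg hc, if_neg hc]
    · have h2 : ¬ i + 2 < (a :: b :: t).length := by simp; omega
      rw [if_neg h2, if_neg h]

-- the window at index 0 is the first two elements
lemma pvSlice_zero (t : List String) (a b : String) :
    PySem.List.slice (a :: b :: t) (some ((0 : Nat) : Int)) (some (((0 : Nat) : Int) + 2)) = [a, b] := by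
  have e1 := PySem.List.slice_natCast_add (xs := a :: b :: t) (j := 0) (n := 2)
  simp only [Nat.cast_ofNat] at e1
  rw [e1]
  rfl

-- characterises A's stride-2 scan on even-length input via the parity split
lemma pvInnerA_parity : ∀ (n : ℕ) (seq : List String) (p : String × String),
    seq.length = 2 * n →
    pvInnerA seq p 0 =
      ((pvEveryOther seq).all (· == p.1) && (pvEveryOther seq.tail).all (· == p.2)) := by
  intro n
  induction n with
  | zero =>
    intro seq p h
    match seq, h with
    | [], _ =>
      rw [pvInnerA]
      simp [pvEveryOther]
  | succ m ih =>
    intro seq p h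
    match seq with
    | a :: b :: t =>
      have ht : t.length = 2 * m := by simp at h; omega
      rw [pvInnerA]
      have h0 : (0 : Nat) < (a :: b :: t).length := by simp
      rw [if_pos h0, pvSlice_zero t a b]
      have hshift : pvInnerA (a :: b :: t) p (0 + 2) = pvInnerA t p 0 :=
        pvInnerA_shift t a b p t.length 0 (by omega)
      by_cases hc : ([a, b] : List String) = [p.1, p.2]
      · have ha : a = p.1 := by injection hc
        have hb : b = p.2 := by injection hc with h1 h2; injection h2
        rw [if_pos hc, hshift, ih t p ht]
        simp [pvEveryOther_cons, ha, hb]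
      · rw [if_neg hc]
        have hnot : ¬ (a = p.1 ∧ b = p.2) := fun ⟨h1, h2⟩ => hc (by rw [h1, h2])
        symm
        rcases not_and_or.mp hnot with ha | hb
        · simp [pvEveryOther_cons, ha]
        · simp [pvEveryOther_cons, hb]

-- ===== VERDICT (by name: the statement is the Claim_ definition above) =====
theorem check_spec : Claim_equal_check := by
  intro seq _
  unfold Spec_check check check_alt
  by_cases hg : (seq.length < 2 || seq.length % 2 != 0) = true
  · rw [if_pos hg, if_pos hg]
  · rw [if_neg hg, if_neg hg]
    have hlen : 2 ≤ seq.length ∧ seq.length % 2 = 0 := by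
      simp only [Bool.or_eq_true, decide_eq_true_eq, bne_iff_ne, ne_eq, not_or] at hg
      omega
    obtain ⟨n, hn⟩ : ∃ n, seq.length = 2 * n := ⟨seq.length / 2, by omega⟩
    match seq, hn with
    | a :: b :: t, hn =>
      have key := fun p => pvInnerA_parity n (a :: b :: t) p hn
      simp only [List.any_cons, List.any_nil, key, Bool.or_false,
        pvEveryOther_cons, List.tail_cons, List.all_cons, List.contains,
        beq_self_eq_true, Bool.true_and, beq_iff_eq, Prod.mk.injEq]
      by_cases hE : ((pvEveryOther t).all (· == a)) = true
      · by_cases hO : ((pvEveryOther t.tail).all (· == b)) = true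
        · have eA : ∀ u : String, a = u → ((pvEveryOther t).all (· == u)) = true := by
            intro u hu; rw [← hu]; exact hE
          have eB : ∀ v : String, b = v → ((pvEveryOther t.tail).all (· == v)) = true := by
            intro v hv; rw [← hv]; exact hO
          by_cases h1 : a = "a" ∧ b = "b"
          · simp [h1.1, h1.2, eA _ h1.1, eB _ h1.2]
          · by_cases h2 : a = "b" ∧ b = "c"
            · simp [h2.1, h2.2, eA _ h2.1, eB _ h2.2]
            · by_cases h3 : a = "c" ∧ b = "a"
              · simp [h3.1, h3.2, eA _ h3.1, eB _ h3.2]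
              · have lhs : ∀ u v : String, ¬ (a = u ∧ b = v) →
                    (((a == u) && (pvEveryOther t).all (· == u)) &&
                     ((b == v) && (pvEveryOther t.tail).all (· == v))) = false := by
                  intro u v huv
                  by_cases hau : a = u
                  · have hbv : ¬ b = v := fun hb => huv ⟨hau, hb⟩
                    simp [hbv]
                  · simp [hau]
                rw [lhs _ _ h1, lhs _ _ h2, lhs _ _ h3]
                have helem : List.elem (a, b) [("a", "b"), ("b", "c"), ("c", "a")] = false := by
                  rw [List.elem_eq_contains, ← Bool.not_eq_true, List.contains_iff_mem]
                  simp only [List.mem_cons, Prod.mk.injEq, not_or]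
                  exact ⟨h1, h2, h3, by simp⟩
                rw [helem]
                simp
        · have hO' : ((pvEveryOther t.tail).all (· == b)) = false := by
            rwa [Bool.not_eq_true] at hO
          have lhs : ∀ u v : String,
              (((a == u) && (pvEveryOther t).all (· == u)) &&
               ((b == v) && (pvEveryOther t.tail).all (· == v))) = false := by
            intro u v
            by_cases hbv : b = v
            · subst hbv; simp [hO']
            · simp [hbv]
          rw [lhs, lhs, lhs]
          simp [hO']
      · have hE' : ((pvEveryOther t).all (· == a)) = false := by
          rwa [Bool.not_eq_true] at hE
        have lhs : ∀ u v : String,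
            (((a == u) && (pvEveryOther t).all (· == u)) &&
             ((b == v) && (pvEveryOther t.tail).all (· == v))) = false := by
          intro u v
          by_cases hau : a = u
          · subst hau; simp [hE']
          · simp [hau]
        rw [lhs, lhs, lhs]
        simp [hE']
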